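-- pv_equiv track=rewrite | github.com/404-error-404/Coder | src/nowcoder/中等/HJ67 24点游戏算法.py | get_combination_3
-- ===== SOURCE A (Python) =====
-- def get_combination_2(x: int, y: int):
--     res = {x + y, x - y, y - x, x * y}
--     if y != 0 and x % y == 0:
--         res.add(x // y)
--     if x != 0 and y % x == 0:
--         res.add(y // x)
--     return res
--
-- def get_combination_3(x: int, y: int, z: int):
--     res = set()
--     for n in get_combination_2(y, z):
--         res |= get_combination_2(x, n)
--     for n in get_combination_2(x, z):
--         res |= get_combination_2(y, n)
--     for n in get_combination_2(x, y):
--         res |= get_combination_2(z, n)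
--     return res
-- ===== SOURCE B (Python) =====
-- def get_combination_2(x: int, y: int):
--     res = {x + y, x - y, y - x, x * y}
--     if y != 0 and x % y == 0:
--         res.add(x // y)
--     if x != 0 and y % x == 0:
--         res.add(y // x)
--     return res
--
-- def _reduce(nums):
--     # general reducer: combine any two numbers until one value remains
--     if len(nums) == 1:
--         return {nums[0]}
--     res = set()
--     for k in range(len(nums)):
--         rest = nums[:k] + nums[k + 1:]
--         for v in _reduce(rest):
--             res |= get_combination_2(nums[k], v)
--     return res
--
-- def get_combination_3(x: int, y: int, z: int):
--     return _reduce([x, y, z])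
-- ===== Notes on version B (the rewrite author's own statement) =====
-- stated objective: alternative
-- what changed: Replaces A's three hardcoded pairings of (x,y,z) by a general recursive reducer over a list of remaining numbers (pick one element, reduce the rest recursively, combine), which generalises to any count and relies on get_combination_2 being symmetric.
import Mathlib
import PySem

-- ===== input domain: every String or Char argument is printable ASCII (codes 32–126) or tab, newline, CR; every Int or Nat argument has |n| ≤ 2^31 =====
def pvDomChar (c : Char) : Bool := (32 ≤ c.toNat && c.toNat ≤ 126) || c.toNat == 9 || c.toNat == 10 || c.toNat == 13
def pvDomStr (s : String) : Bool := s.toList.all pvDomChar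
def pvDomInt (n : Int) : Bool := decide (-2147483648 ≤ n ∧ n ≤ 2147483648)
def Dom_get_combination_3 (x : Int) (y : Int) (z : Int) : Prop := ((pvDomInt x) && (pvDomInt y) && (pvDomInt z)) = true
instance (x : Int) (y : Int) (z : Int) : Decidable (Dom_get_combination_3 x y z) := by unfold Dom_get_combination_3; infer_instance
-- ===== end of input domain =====

-- B replaces A's three hardcoded pairings by a general recursive list reducer (alternative decomposition, same cost).

-- ===== PORT A =====
-- shared helper: get_combination_2 (identical in both Python sources)
def gc2 (x : Int) (y : Int) : PySem.Set Int :=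
  let res : PySem.Set Int := PySem.Set.ofList [x + y, x - y, y - x, x * y]
  let res := if y ≠ 0 ∧ PySem.Int.mod x y = 0 then PySem.Set.add res (PySem.Int.floordiv x y) else res
  if x ≠ 0 ∧ PySem.Int.mod y x = 0 then PySem.Set.add res (PySem.Int.floordiv y x) else res

def get_combination_3 (x : Int) (y : Int) (z : Int) : List Int :=
  let res : PySem.Set Int := PySem.Set.empty
  let res := (gc2 y z).foldl (fun r n => PySem.Set.union r (gc2 x n)) res
  let res := (gc2 x z).foldl (fun r n => PySem.Set.union r (gc2 y n)) res
  (gc2 x y).foldl (fun r n => PySem.Set.union r (gc2 z n)) res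

-- ===== PORT B =====
-- _reduce: pick index k, recurse on the rest, combine nums[k] with each reduced value
def reduceB (nums : List Int) : PySem.Set Int :=
  if nums.length = 1 then PySem.Set.ofList [nums.headI]
  else
    (List.range nums.length).attach.foldl
      (fun res k =>
        (reduceB (nums.take k.1 ++ nums.drop (k.1 + 1))).foldl
          (fun r v => PySem.Set.union r (gc2 (nums.getD k.1 0) v)) res)
      PySem.Set.empty
termination_by nums.length
decreasing_by
  have hk := k.2
  simp only [List.mem_range] at hk
  simp only [List.length_append, List.length_take, List.length_drop]
  omega

def get_combination_3_alt (x : Int) (y : Int) (z : Int) : List Int :=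
  reduceB [x, y, z]

-- ===== PRECONDITION & SPEC =====
def Spec_get_combination_3 (x : Int) (y : Int) (z : Int) (out : List Int) : Prop := out = get_combination_3_alt x y z
instance (x : Int) (y : Int) (z : Int) (out : List Int) : Decidable (Spec_get_combination_3 x y z out) := by unfold Spec_get_combination_3; infer_instance

-- ===== CLAIM (what is proved, stated in full; the proofs are below) =====
def Claim_equal_get_combination_3 : Prop := ∀ (x : Int) (y : Int) (z : Int), Dom_get_combination_3 x y z → Spec_get_combination_3 x y z (get_combination_3 x y z)

-- ===== LEMMAS AND PROOFS =====

theorem mem_gc2 (x y a : Int) : a ∈ gc2 x y ↔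
    (a = x + y ∨ a = x - y ∨ a = y - x ∨ a = x * y ∨
     (y ≠ 0 ∧ PySem.Int.mod x y = 0 ∧ a = PySem.Int.floordiv x y) ∨
     (x ≠ 0 ∧ PySem.Int.mod y x = 0 ∧ a = PySem.Int.floordiv y x)) := by
  unfold gc2
  split_ifs <;> simp [PySem.Set.mem_add, PySem.Set.mem_ofList] <;> tauto

theorem gc2_symm_mem (x y a : Int) (h : a ∈ gc2 x y) : a ∈ gc2 y x := by
  rw [mem_gc2] at h ⊢
  rw [Int.add_comm y x, Int.mul_comm y x]
  tauto

theorem nodup_gc2 (x y : Int) : (gc2 x y).Nodup := by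
  unfold gc2
  split_ifs <;> (repeat' apply PySem.Set.nodup_add) <;> first | exact PySem.Set.nodup_ofList _ | exact List.nodup_nil

theorem union_eq_self (s t : List Int) (h : ∀ a ∈ t, a ∈ s) : PySem.Set.union s t = s := by
  induction t generalizing s with
  | nil => rfl
  | cons b t ih =>
      show PySem.Set.update s (b :: t) = s
      rw [PySem.Set.update_cons, PySem.Set.add_of_mem (h b (by simp))]
      exact ih s (fun a ha => h a (by simp [ha]))

theorem reduceB_single (v : Int) : reduceB [v] = [v] := by
  rw [reduceB]; rfl

theorem union_nil_gc2 (x y : Int) : PySem.Set.union [] (gc2 x y) = gc2 x y := by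
  show PySem.Set.update [] (gc2 x y) = gc2 x y
  rw [PySem.Set.update_nil_left]
  exact PySem.Set.ofList_eq_self_of_nodup _ (nodup_gc2 x y)

theorem reduceB_pair (a b : Int) : reduceB [a, b] = gc2 a b := by
  rw [reduceB]
  norm_num [List.attach, List.attachWith, List.range_succ, reduceB_single]
  rw [union_nil_gc2]
  exact union_eq_self _ _ (fun v hv => gc2_symm_mem b a v hv)

-- ===== VERDICT (by name: the statement is the Claim_ definition above) =====
theorem get_combination_3_spec : Claim_equal_get_combination_3 := by
  intro x y z _
  show get_combination_3 x y z = get_combination_3_alt x y z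
  unfold get_combination_3_alt
  rw [reduceB]
  norm_num [List.attach, List.attachWith, List.range_succ, reduceB_pair]
  rfl
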